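-- pv_equiv track=rewrite | github.com/digital4rensics/WhoTrack | parsers/ru.py | parse
-- ===== SOURCE A (Python) =====
-- def parse(data):
-- 	extracted = {}
-- 	temp = data.split('\n')
-- 	for line in temp:
-- 		if line.startswith("person:"):
-- 			temp2 = line.split(":")
-- 			extracted['name'] = temp2[1].strip()
-- 			extracted['organization'] = None
-- 		elif line.startswith("org:"):
-- 			temp2 = line.split(":")
-- 			extracted['organization'] = temp2[1].strip()
-- 			extracted['name'] = None
--
-- 	extracted['address'] = None
-- 	extracted['email'] = None
-- 	extracted['phone'] = None
-- 	extracted['fax'] = None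
--
-- 	if extracted:
-- 		return extracted
-- ===== SOURCE B (Python) =====
-- def parse(data):
--     lines = data.split('\n')
--     match = next((l for l in reversed(lines) if l.startswith(("person:", "org:"))), None)
--     result = {}
--     if match is not None:
--         value = match.split(':')[1].strip()
--         is_person = match.startswith("person:")
--         result["name"] = value if is_person else None
--         result["organization"] = None if is_person else value
--     result.update(address=None, email=None, phone=None, fax=None)
--     return result
-- ===== Notes on version B (the rewrite author's own statement) =====
-- stated objective: simpler
-- what changed: Instead of scanning all lines and overwriting name/organization on every match, B finds the single decisive (last) 'person:'/'org:' line once and builds the dict from it; Pre_ excludes inputs whose first matching line is an 'org:' line, where A's key order (organization before name) is an accidental artefact of overwrite order while B always emits name first (the two dicts are equal as mappings there).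
import Mathlib
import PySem

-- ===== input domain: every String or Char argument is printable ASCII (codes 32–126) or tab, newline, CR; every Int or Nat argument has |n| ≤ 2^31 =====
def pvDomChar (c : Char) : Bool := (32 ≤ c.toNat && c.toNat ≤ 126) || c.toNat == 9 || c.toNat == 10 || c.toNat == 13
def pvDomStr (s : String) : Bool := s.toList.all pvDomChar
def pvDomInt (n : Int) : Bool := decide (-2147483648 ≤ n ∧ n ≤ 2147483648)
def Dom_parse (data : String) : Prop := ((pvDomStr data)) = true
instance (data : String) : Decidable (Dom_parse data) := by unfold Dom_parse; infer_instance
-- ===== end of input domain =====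

-- B finds the single decisive (last) "person:"/"org:" line once instead of scanning and
-- overwriting; equivalence is about the RETURN value (A mutates nothing observable).

-- ===== PORT A =====
-- one loop step of A's for-loop over lines (state = the dict `extracted`)
def parseStep (d : PySem.Dict String (Option String)) (line : String) :
    PySem.Dict String (Option String) :=
  if PySem.Str.startswith line "person:" then
    -- temp2[1] always exists here: the line starts with "person:" so it contains ':'
    let temp2 := (PySem.Str.split? line ":").getD []
    (d.insert "name" (some (PySem.Str.strip ((PySem.List.pyGet? temp2 1).getD "")))).insert
      "organization" none
  else if PySem.Str.startswith line "org:" then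
    let temp2 := (PySem.Str.split? line ":").getD []
    (d.insert "organization" (some (PySem.Str.strip ((PySem.List.pyGet? temp2 1).getD "")))).insert
      "name" none
  else d

def parse (data : String) : List (String × Option String) :=
  let temp := (PySem.Str.split? data "\n").getD []
  let extracted := temp.foldl parseStep PySem.Dict.empty
  let extracted :=
    (((extracted.insert "address" none).insert "email" none).insert "phone" none).insert "fax" none
  -- `if extracted:` is always true here (four keys were just added), so A returns `extracted`
  extracted.items

-- ===== PORT B =====
def pvIsMatch (l : String) : Bool :=
  PySem.Str.startswith l "person:" || PySem.Str.startswith l "org:"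

def pvVal (l : String) : String :=
  PySem.Str.strip ((PySem.List.pyGet? ((PySem.Str.split? l ":").getD []) 1).getD "")

def parse_alt (data : String) : List (String × Option String) :=
  let lines := (PySem.Str.split? data "\n").getD []
  -- next((l for l in reversed(lines) if l.startswith(...)), None)
  let m? := lines.reverse.find? pvIsMatch
  let result : List (String × Option String) :=
    match m? with
    | none => []
    | some m =>
        let value := pvVal m
        let isPerson := PySem.Str.startswith m "person:"
        [("name", if isPerson then some value else none),
         ("organization", if isPerson then none else some value)]
  result ++ [("address", none), ("email", none), ("phone", none), ("fax", none)]

-- ===== PRECONDITION & SPEC =====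
-- Pre_ excludes inputs whose FIRST "person:"/"org:" line is an "org:" line: there A's dict
-- happens to list 'organization' before 'name' (an artefact of in-place overwrite order),
-- while B always emits 'name' first — a key-order corner where the dicts are equal as mappings.
def Pre_parse (data : String) : Prop :=
  ((((PySem.Str.split? data "\n").getD []).find? pvIsMatch).all
    (fun l => PySem.Str.startswith l "person:")) = true
instance (data : String) : Decidable (Pre_parse data) := by unfold Pre_parse; infer_instance

def pvWitness_parse : String := "person: Bob\norg: Acme\nfoo"

def Spec_parse (data : String) (out : List (String × Option String)) : Prop := out = parse_alt data
instance (data : String) (out : List (String × Option String)) : Decidable (Spec_parse data out) := by unfold Spec_parse; infer_instance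

-- ===== CLAIM (what is proved, stated in full; the proofs are below) =====
def Claim_equal_parse : Prop := ∀ (data : String), Dom_parse data → Pre_parse data → Spec_parse data (parse data)

-- ===== LEMMAS AND PROOFS =====

-- the name/organization items of A's dict, as a function of the matching lines seen so far
def pvBuild (ms : List String) : List (String × Option String) :=
  match ms with
  | [] => []
  | m0 :: rest =>
    let mlast := PySem.List.pyGetD (m0 :: rest) (-1) ""
    let val := pvVal mlast
    let isPerson := PySem.Str.startswith mlast "person:"
    let name : Option String := if isPerson then some val else none
    let org : Option String := if isPerson then none else some val
    if PySem.Str.startswith m0 "person:" then [("name", name), ("organization", org)]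
    else [("organization", org), ("name", name)]

-- pvBuild of one more matching line appended
theorem pvBuild_append (ms : List String) (l : String) :
    pvBuild (ms ++ [l]) =
      if PySem.Str.startswith (ms.headD l) "person:" then
        [("name", if PySem.Str.startswith l "person:" then some (pvVal l) else none),
         ("organization", if PySem.Str.startswith l "person:" then none else some (pvVal l))]
      else
        [("organization", if PySem.Str.startswith l "person:" then none else some (pvVal l)),
         ("name", if PySem.Str.startswith l "person:" then some (pvVal l) else none)] := by
  cases ms with
  | nil => rfl
  | cons m0 rest =>
      rw [List.cons_append]
      simp only [pvBuild]
      rw [← List.cons_append, PySem.List.pyGetD_neg_one_append_singleton, List.headD_cons]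

-- A's loop step, applied to the dict whose items are pvBuild of the matches so far
theorem parseStep_build (ms : List String) (l : String) :
    parseStep (PySem.Dict.mk (pvBuild ms)) l =
      PySem.Dict.mk (pvBuild (ms ++ (if pvIsMatch l then [l] else []))) := by
  unfold parseStep
  by_cases hp : PySem.Str.startswith l "person:" = true
  · have hm : pvIsMatch l = true := by unfold pvIsMatch; rw [hp]; rfl
    rw [hm, if_pos rfl, pvBuild_append]
    cases ms with
    | nil => rw [List.headD_nil]; simp only [if_pos hp]; rfl
    | cons m0 rest =>
        rw [List.headD_cons]
        simp only [pvBuild, if_pos hp]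
        by_cases h0 : PySem.Str.startswith m0 "person:" = true
        · simp only [if_pos h0]; rfl
        · simp only [if_neg h0]; rfl
  · rw [Bool.not_eq_true] at hp
    have hnp : ¬ (PySem.Str.startswith l "person:" = true) := by
      rw [hp]; exact Bool.false_ne_true
    by_cases ho : PySem.Str.startswith l "org:" = true
    · have hm : pvIsMatch l = true := by unfold pvIsMatch; rw [hp, ho]; rfl
      rw [hm, if_pos rfl, pvBuild_append]
      cases ms with
      | nil => rw [List.headD_nil]; simp only [if_neg hnp, if_pos ho]; rfl
      | cons m0 rest =>
          rw [List.headD_cons]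
          simp only [pvBuild, if_neg hnp, if_pos ho]
          by_cases h0 : PySem.Str.startswith m0 "person:" = true
          · simp only [if_pos h0]; rfl
          · simp only [if_neg h0]; rfl
    · rw [Bool.not_eq_true] at ho
      have hm : pvIsMatch l = false := by unfold pvIsMatch; rw [hp, ho]; rfl
      rw [hm, if_neg Bool.false_ne_true, List.append_nil]
      simp only [if_neg hnp, if_neg (by rw [ho]; exact Bool.false_ne_true :
        ¬ (PySem.Str.startswith l "org:" = true))]

-- A's loop over all lines lands on pvBuild of the matching lines
theorem foldl_parseStep (ls : List String) :
    ls.foldl parseStep PySem.Dict.empty = PySem.Dict.mk (pvBuild (ls.filter pvIsMatch)) := by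
  induction ls using List.reverseRecOn with
  | nil => rfl
  | append_singleton ls l ih =>
      rw [List.foldl_append, List.filter_append, List.foldl_cons, List.foldl_nil, ih,
        parseStep_build]
      cases h : pvIsMatch l <;> simp [h]

-- appending the four constant keys to the name/organization dict
theorem items_after_four (ms : List String) :
    (((((PySem.Dict.mk (pvBuild ms)).insert "address" none).insert "email" none).insert
        "phone" none).insert "fax" none).items =
      pvBuild ms ++ [("address", none), ("email", none), ("phone", none), ("fax", none)] := by
  cases ms with
  | nil => rfl
  | cons m0 rest =>
      simp only [pvBuild]
      by_cases h0 : PySem.Str.startswith m0 "person:" = true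
      · simp only [if_pos h0]; rfl
      · simp only [if_neg h0]; rfl

-- when the first matching line is a person-line, pvBuild is B's result from the last match
theorem pvBuild_eq_of_head_person (ms : List String)
    (h : (ms.head?.all (fun l => PySem.Str.startswith l "person:")) = true) :
    pvBuild ms =
      match ms.getLast? with
      | none => []
      | some m =>
          [("name", if PySem.Str.startswith m "person:" then some (pvVal m) else none),
           ("organization", if PySem.Str.startswith m "person:" then none else some (pvVal m))] := by
  cases ms with
  | nil => rfl
  | cons m0 rest =>
      simp only [List.head?_cons, Option.all_some] at h
      have hne : m0 :: rest ≠ [] := List.cons_ne_nil _ _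
      simp only [pvBuild, if_pos h, PySem.List.pyGetD_neg_one _ _ hne,
        List.getLast?_eq_some_getLast hne]

-- find? is the head of the filtered list; on the reversed list it is the last match
theorem find?_eq_head?_filter' (p : String → Bool) (l : List String) :
    l.find? p = (l.filter p).head? := by
  induction l with
  | nil => rfl
  | cons a l ih =>
      rw [List.find?_cons, List.filter_cons]
      cases h : p a
      · exact ih
      · rfl

theorem find?_reverse_eq_getLast?_filter (p : String → Bool) (l : List String) :
    l.reverse.find? p = (l.filter p).getLast? := by
  rw [find?_eq_head?_filter', List.filter_reverse, List.head?_reverse]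

-- ===== VERDICT (by name: the statement is the Claim_ definition above) =====
theorem parse_spec : Claim_equal_parse := by
  intro data _ hpre
  show parse data = parse_alt data
  unfold Pre_parse at hpre
  rw [find?_eq_head?_filter'] at hpre
  simp only [parse, parse_alt]
  rw [foldl_parseStep, items_after_four, find?_reverse_eq_getLast?_filter,
    pvBuild_eq_of_head_person _ hpre]
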